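-- pv_equiv track=rewrite | github.com/pypi-data/pypi-mirror-92 | packages/h5dict/H5dict-0.1.4.tar.gz/H5dict-0.1.4/h5dict/h5dict.py | is_numeric_index
-- ===== SOURCE A (Python) =====
-- def is_numeric_index(l):
--     new_l = []
--     for v in l:
--         try:
--             new_l.append(int(v))
--         except:
--             return False
--     new_l.sort()
--     if len(new_l) == 0:
--         return False
--     if new_l[0] != 0:
--         return False
--     last_i = new_l[0]
--     for i in new_l[1:]:
--         if i-last_i != 1:
--             return False
--         last_i = i
--     return True
-- ===== SOURCE B (Python) =====
-- def is_numeric_index(l):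
--     n = len(l)
--     if n == 0:
--         return False
--     seen = [False] * n
--     for v in l:
--         try:
--             x = int(v)
--         except:
--             return False
--         if x < 0 or x >= n or seen[x]:
--             return False
--         seen[x] = True
--     return True
-- ===== Notes on version B (the rewrite author's own statement) =====
-- stated objective: alternative
-- what changed: Replaces convert-all, sort, then adjacent-difference scan with a single pass that range-checks each converted value and marks it in a presence table, detecting duplicates and gaps together.
import Mathlib
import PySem

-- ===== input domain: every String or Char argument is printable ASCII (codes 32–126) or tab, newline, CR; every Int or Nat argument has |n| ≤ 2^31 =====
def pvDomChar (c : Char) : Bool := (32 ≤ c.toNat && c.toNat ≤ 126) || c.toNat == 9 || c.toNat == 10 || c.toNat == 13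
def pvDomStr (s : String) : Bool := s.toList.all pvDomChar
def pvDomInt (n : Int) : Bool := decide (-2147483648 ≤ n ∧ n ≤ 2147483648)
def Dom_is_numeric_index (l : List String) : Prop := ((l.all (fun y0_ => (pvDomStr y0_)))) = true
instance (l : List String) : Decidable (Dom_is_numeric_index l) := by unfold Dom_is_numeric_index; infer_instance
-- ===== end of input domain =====

-- B is a different algorithm: one pass over a boolean presence table instead of A's
-- convert-all / sort / adjacent-difference scan; return value agreed to be equal (no mutation).

-- ===== PORT A =====
-- the first loop: build new_l with int(v), bare except returns False (none)
def avConv : List String → List Int → Option (List Int)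
  | [], acc => some acc
  | v :: rest, acc =>
    match PySem.Int.ofStr? v with
    | some x => avConv rest (acc ++ [x])
    | none => none

-- the second loop over new_l[1:] with last_i
def avScan : List Int → Int → Bool
  | [], _ => true
  | i :: rest, last_i => if i - last_i ≠ 1 then false else avScan rest i

def is_numeric_index (l : List String) : Bool :=
  match avConv l [] with
  | none => false
  | some new_l =>
    match PySem.List.sorted new_l (fun x => x) false with
    | [] => false                                  -- len(new_l) == 0
    | h :: t => if h ≠ 0 then false else avScan t h  -- new_l[0] != 0, then the scan

-- ===== PORT B =====
-- the single pass: parse, range-check, duplicate-check against seen, mark seen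
def bvLoop (n : Int) : List String → List Bool → Bool
  | [], _ => true
  | v :: rest, seen =>
    match PySem.Int.ofStr? v with
    | none => false
    | some x =>
      if x < 0 || n ≤ x || PySem.List.pyGetD seen x false then false
      else bvLoop n rest (PySem.List.pySetD seen x true)

def is_numeric_index_alt (l : List String) : Bool :=
  let n : Int := l.length
  if n == 0 then false
  else bvLoop n l (List.replicate l.length false)

-- ===== PRECONDITION & SPEC =====
def Spec_is_numeric_index (l : List String) (out : Bool) : Prop := out = is_numeric_index_alt l
instance (l : List String) (out : Bool) : Decidable (Spec_is_numeric_index l out) := by unfold Spec_is_numeric_index; infer_instance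

-- ===== CLAIM (what is proved, stated in full; the proofs are below) =====
def Claim_equal_is_numeric_index : Prop := ∀ (l : List String), Dom_is_numeric_index l → Spec_is_numeric_index l (is_numeric_index l)

-- ===== LEMMAS AND PROOFS =====

/-- The shared parse of the whole list. -/
def pvParse (l : List String) : Option (List Int) := l.mapM PySem.Int.ofStr?

/-- The ramp a, a+1, …, a+n-1. -/
def pvRamp (a : Int) (n : Nat) : List Int := (List.range n).map (fun (k : Nat) => a + (k : Int))

theorem pvRamp_succ (a : Int) (n : Nat) :
    pvRamp a (n + 1) = a :: pvRamp (a + 1) n := by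
  unfold pvRamp
  rw [List.range_succ_eq_map, List.map_cons, List.map_map]
  congr 1
  · simp
  · apply List.map_congr_left
    intro k _
    simp only [Function.comp_apply]
    push_cast
    ring

theorem pvRamp_length (a : Int) (n : Nat) : (pvRamp a n).length = n := by
  simp [pvRamp]

theorem pvRamp_mem (a : Int) (n : Nat) (x : Int) :
    x ∈ pvRamp a n ↔ a ≤ x ∧ x < a + n := by
  constructor
  · intro hx
    simp only [pvRamp, List.mem_map, List.mem_range] at hx
    obtain ⟨k, hk, rfl⟩ := hx
    omega
  · rintro ⟨h1, h2⟩
    simp only [pvRamp, List.mem_map, List.mem_range]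
    exact ⟨(x - a).toNat, by omega, by omega⟩

theorem pvRamp_pairwise (a : Int) (n : Nat) : (pvRamp a n).Pairwise (· < ·) := by
  induction n generalizing a with
  | zero => simp [pvRamp]
  | succ m ih =>
    rw [pvRamp_succ]
    refine List.pairwise_cons.2 ⟨?_, ih (a + 1)⟩
    intro x hx
    have := (pvRamp_mem (a + 1) m x).1 hx
    omega

theorem pvRamp_nodup (a : Int) (n : Nat) : (pvRamp a n).Nodup :=
  (pvRamp_pairwise a n).imp (fun h => ne_of_lt h)

/-- A's tail scan accepts exactly the ramp continuing last_i. -/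
theorem avScan_iff (t : List Int) (last_i : Int) :
    avScan t last_i = true ↔ t = pvRamp (last_i + 1) t.length := by
  induction t generalizing last_i with
  | nil => simp [avScan, pvRamp]
  | cons i rest ih =>
    simp only [avScan, List.length_cons, pvRamp_succ]
    by_cases h : i - last_i = 1
    · have hi : i = last_i + 1 := by omega
      subst hi
      simp [ih]
    · simp [h]
      intro h'
      omega

/-- avConv is the accumulator form of pvParse. -/
theorem avConv_eq (l : List String) (acc : List Int) :
    avConv l acc = (pvParse l).map (acc ++ ·) := by
  induction l generalizing acc with
  | nil => simp [avConv, pvParse]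
  | cons v rest ih =>
    simp only [avConv, pvParse, List.mapM_cons]
    cases PySem.Int.ofStr? v with
    | none => simp
    | some x =>
      simp only [Option.pure_def, Option.bind_some, Option.bind_eq_bind]
      rw [ih, show rest.mapM PySem.Int.ofStr? = pvParse rest from rfl]
      cases pvParse rest <;> simp

theorem pvParse_length (l : List String) (xs : List Int)
    (h : pvParse l = some xs) : xs.length = l.length := by
  induction l generalizing xs with
  | nil => simp [pvParse] at h; simp [← h]
  | cons v rest ih =>
    simp only [pvParse, List.mapM_cons] at h
    cases hv : PySem.Int.ofStr? v with
    | none => simp [hv] at h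
    | some x =>
      rw [hv] at h
      cases hr : rest.mapM PySem.Int.ofStr? with
      | none => simp [hr] at h
      | some ys =>
        simp [hr] at h
        simp [← h, ih ys hr]

/-- Characterisation of A. -/
theorem a_true_iff (l : List String) :
    is_numeric_index l = true ↔
      ∃ xs, pvParse l = some xs ∧ xs ≠ [] ∧ xs.Perm (pvRamp 0 xs.length) := by
  unfold is_numeric_index
  rw [avConv_eq]
  cases hp : pvParse l with
  | none => simp
  | some xs =>
    simp only [Option.map_some, List.nil_append, Option.some.injEq]
    constructor
    · intro h
      refine ⟨xs, rfl, ?_, ?_⟩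
      · intro hnil
        subst hnil
        simp [PySem.List.sorted] at h
      · cases hs : PySem.List.sorted xs (fun x => x) false with
        | nil => rw [hs] at h; exact absurd h (by simp)
        | cons h0 t =>
          rw [hs] at h
          have h' : (if h0 ≠ 0 then false else avScan t h0) = true := h
          by_cases hz : h0 = 0
          · subst hz
            rw [if_neg (by simp)] at h'
            have ht := (avScan_iff t 0).1 h'
            have hts : t = pvRamp 1 t.length := by simpa using ht
            have hperm : (PySem.List.sorted xs (fun x => x) false).Perm xs :=
              PySem.List.sorted_perm xs (fun x => x) false
            have hlen : xs.length = t.length + 1 := by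
              have := hperm.length_eq
              rw [hs] at this
              simpa using this.symm
            have heq : PySem.List.sorted xs (fun x => x) false = pvRamp 0 xs.length := by
              rw [hs, hlen, pvRamp_succ, zero_add]
              exact congrArg (List.cons 0) hts
            exact ((heq ▸ hperm).symm)
          · simp [hz] at h'
    · rintro ⟨ys, rfl, hne, hperm⟩
      have hsorted : PySem.List.sorted xs (fun x => x) false = pvRamp 0 xs.length :=
        PySem.List.sorted_eq_of_perm_of_pairwise_lt xs (pvRamp 0 xs.length) (fun x => x)
          hperm.symm (by simpa using pvRamp_pairwise 0 xs.length)
      have hlen : xs.length ≠ 0 := by simpa using (List.length_pos_iff.2 hne).ne'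
      obtain ⟨m, hm⟩ : ∃ m, xs.length = m + 1 := ⟨xs.length - 1, by omega⟩
      rw [hsorted, hm, pvRamp_succ]
      show (if (0 : Int) ≠ 0 then false else avScan (pvRamp (0 + 1) m) 0) = true
      rw [if_neg (by simp), avScan_iff]
      rw [pvRamp_length]

/-- get-after-set on the seen table, for in-range nonnegative indices. -/
theorem pv_get_set (seen : List Bool) (x y : Int) (hx0 : 0 ≤ x)
    (_hx : x < (seen.length : Int)) (hy0 : 0 ≤ y) (hy : y < (seen.length : Int)) :
    PySem.List.pyGetD (PySem.List.pySetD seen x true) y false =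
      (if y = x then true else PySem.List.pyGetD seen y false) := by
  rw [PySem.List.pySetD_of_nonneg _ _ hx0]
  rw [PySem.List.pyGetD_eq_getElem _ _ hy0 (by simpa using hy),
      PySem.List.pyGetD_eq_getElem _ _ hy0 (by simpa using hy)]
  rw [List.getElem_set]
  have : x.toNat = y.toNat ↔ y = x := by omega
  split_ifs with h1 h2 h2 <;> simp_all

/-- pvParse on a cons. -/
theorem pvParse_cons (v : String) (rest : List String) :
    pvParse (v :: rest) = (PySem.Int.ofStr? v).bind (fun x => (pvParse rest).map (x :: ·)) := by
  simp only [pvParse, List.mapM_cons]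
  cases PySem.Int.ofStr? v <;> cases rest.mapM PySem.Int.ofStr? <;> simp

/-- B's loop invariant. -/
theorem bvLoop_iff (n : Int) (rest : List String) (seen : List Bool)
    (hn : (seen.length : Int) = n) :
    bvLoop n rest seen = true ↔
      ∃ ys, pvParse rest = some ys ∧ ys.Nodup ∧
        (∀ y ∈ ys, 0 ≤ y ∧ y < n) ∧
        (∀ y ∈ ys, PySem.List.pyGetD seen y false = false) := by
  induction rest generalizing seen with
  | nil => simp [bvLoop, pvParse]
  | cons v rest ih =>
    rw [pvParse_cons]
    cases hv : PySem.Int.ofStr? v with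
    | none => simp [bvLoop, hv]
    | some x =>
      simp only [Option.bind_some]
      have hloop : bvLoop n (v :: rest) seen =
          (if (decide (x < 0) || decide (n ≤ x) || PySem.List.pyGetD seen x false) then false
           else bvLoop n rest (PySem.List.pySetD seen x true)) := by
        simp [bvLoop, hv]
      rw [hloop]
      by_cases hbad : x < 0 ∨ n ≤ x ∨ PySem.List.pyGetD seen x false = true
      · have hb : (decide (x < 0) || decide (n ≤ x) || PySem.List.pyGetD seen x false) = true := by
          rcases hbad with h | h | h <;> simp [h]
        rw [if_pos hb]
        constructor
        · intro h; exact absurd h (by simp)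
        · rintro ⟨ys, hys, hnd, hbnd, hseen⟩
          rcases Option.map_eq_some_iff.1 hys with ⟨zs, hzs, rfl⟩
          have hx := hbnd x (by simp)
          have hsx := hseen x (by simp)
          rcases hbad with h | h | h
          · exact absurd hx.1 (by omega)
          · exact absurd hx.2 (by omega)
          · rw [h] at hsx; exact absurd hsx (by simp)
      · have hx0' : 0 ≤ x := by
          by_contra hc; exact hbad (Or.inl (by omega))
        have hxn : x < n := by
          by_contra hc; exact hbad (Or.inr (Or.inl (by omega)))
        have hxseen : PySem.List.pyGetD seen x false = false := by
          cases hg : PySem.List.pyGetD seen x false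
          · rfl
          · exact absurd (Or.inr (Or.inr hg)) hbad
        have hb : (decide (x < 0) || decide (n ≤ x) || PySem.List.pyGetD seen x false) = false := by
          simp only [Bool.or_eq_false_iff, decide_eq_false_iff_not, hxseen]
          exact ⟨⟨by omega, by omega⟩, trivial⟩
        rw [hb, if_neg (by simp)]
        have hlen' : ((PySem.List.pySetD seen x true).length : Int) = n := by
          rw [PySem.List.pySetD_of_nonneg _ _ hx0']
          simpa using hn
        rw [ih _ hlen']
        constructor
        · rintro ⟨ys, hys, hnd, hbnd, hseen⟩
          refine ⟨x :: ys, by simp [hys], ?_, ?_, ?_⟩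
          · refine List.nodup_cons.2 ⟨?_, hnd⟩
            intro hmem
            have := hseen x hmem
            rw [pv_get_set seen x x hx0' (by omega) hx0' (by omega)] at this
            simp at this
          · intro y hy
            rcases List.mem_cons.1 hy with rfl | hy
            · exact ⟨hx0', hxn⟩
            · exact hbnd y hy
          · intro y hy
            rcases List.mem_cons.1 hy with rfl | hy
            · exact hxseen
            · have := hseen y hy
              have hyb := hbnd y hy
              rw [pv_get_set seen x y hx0' (by omega) (by omega) (by omega)] at this
              split_ifs at this
              exact this
        · rintro ⟨ys, hys, hnd, hbnd, hseen⟩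
          rcases Option.map_eq_some_iff.1 hys with ⟨zs, hzs, rfl⟩
          refine ⟨zs, hzs, (List.nodup_cons.1 hnd).2, fun y hy => hbnd y (by simp [hy]), ?_⟩
          intro y hy
          have hyb := hbnd y (by simp [hy])
          rw [pv_get_set seen x y hx0' (by omega) (by omega) (by omega)]
          have hne : y ≠ x := by
            intro h; subst h
            exact (List.nodup_cons.1 hnd).1 hy
          rw [if_neg hne]
          exact hseen y (by simp [hy])

/-- Characterisation of B. -/
theorem b_true_iff (l : List String) :
    is_numeric_index_alt l = true ↔
      l ≠ [] ∧ ∃ xs, pvParse l = some xs ∧ xs.Nodup ∧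
        (∀ x ∈ xs, 0 ≤ x ∧ x < (l.length : Int)) := by
  by_cases hl : l = []
  · subst hl; simp [is_numeric_index_alt]
  · have h0 : ((l.length : Int) == 0) = false := by
      have : l.length ≠ 0 := by simpa using hl
      simp
      omega
    have hstep : is_numeric_index_alt l = bvLoop (l.length : Int) l (List.replicate l.length false) := by
      unfold is_numeric_index_alt
      simp only [h0, Bool.false_eq_true, if_false]
    rw [hstep, bvLoop_iff _ _ _ (by simp)]
    constructor
    · rintro ⟨ys, h1, h2, h3, _⟩
      exact ⟨hl, ys, h1, h2, h3⟩
    · rintro ⟨_, ys, h1, h2, h3⟩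
      refine ⟨ys, h1, h2, h3, ?_⟩
      intro y hy
      have := h3 y hy
      rw [PySem.List.pyGetD_eq_getElem _ _ (by omega) (by simpa using this.2)]
      simp

/-- Perm of the ramp ↔ nodup + in-range, given the length. -/
theorem perm_ramp_iff (xs : List Int) :
    xs.Perm (pvRamp 0 xs.length) ↔
      xs.Nodup ∧ ∀ x ∈ xs, 0 ≤ x ∧ x < (xs.length : Int) := by
  constructor
  · intro h
    refine ⟨h.nodup_iff.2 (pvRamp_nodup 0 xs.length), ?_⟩
    intro x hx
    have := (pvRamp_mem 0 xs.length x).1 (h.mem_iff.1 hx)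
    omega
  · rintro ⟨hnd, hbnd⟩
    have hsub : xs ⊆ pvRamp 0 xs.length := by
      intro x hx
      rw [pvRamp_mem]
      have := hbnd x hx
      omega
    have hsp : xs.Subperm (pvRamp 0 xs.length) := List.subperm_of_subset hnd hsub
    exact hsp.perm_of_length_le (by rw [pvRamp_length])

-- ===== VERDICT (by name: the statement is the Claim_ definition above) =====
theorem is_numeric_index_spec : Claim_equal_is_numeric_index := by
  intro l _
  unfold Spec_is_numeric_index
  have hiff : is_numeric_index l = true ↔ is_numeric_index_alt l = true := by
    rw [a_true_iff, b_true_iff]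
    constructor
    · rintro ⟨xs, hp, hne, hperm⟩
      have hlen := pvParse_length l xs hp
      obtain ⟨hnd, hbnd⟩ := (perm_ramp_iff xs).1 hperm
      refine ⟨?_, xs, hp, hnd, by rw [← hlen]; exact hbnd⟩
      intro h; subst h
      simp [pvParse] at hp
      simp [← hp] at hne
    · rintro ⟨hl, xs, hp, hnd, hbnd⟩
      have hlen := pvParse_length l xs hp
      refine ⟨xs, hp, ?_, (perm_ramp_iff xs).2 ⟨hnd, by rw [hlen]; exact hbnd⟩⟩
      intro h; subst h
      simp at hlen
      exact hl (List.length_eq_zero_iff.1 hlen.symm)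
  cases ha : is_numeric_index l <;> cases hb : is_numeric_index_alt l <;> simp_all
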